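-- pv_equiv track=rewrite | github.com/Weelie92/AdventOfCode2024 | Day 2/Part2.py | can_be_safe_with_removal
-- ===== SOURCE A (Python) =====
-- def is_safe(int_list):
--     i = 0
--     while i < len(int_list) - 1:
--         current_num = int_list[i]
--         next_num = int_list[i + 1]
--
--         if i == 0:
--             ascending = current_num < next_num
--
--         if current_num == next_num:
--             return False
--
--
--         if not (0 < abs(current_num - next_num) <= 3):
--             return False
--
--
--         if ascending and current_num > next_num:
--             return False
--
--         elif not ascending and current_num < next_num:
--             return False
--         i += 1
--
--     return True
--
-- def can_be_safe_with_removal(int_list):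
--     for i in range(len(int_list)):
--         # Remove the current element temporarily
--         removed_element = int_list.pop(i)
--
--         if is_safe(int_list):
--             int_list.insert(i, removed_element)
--             return True
--
--         # Add the removed element
--         int_list.insert(i, removed_element)
--
--     return False
-- ===== SOURCE B (Python) =====
-- def can_be_safe_with_removal(int_list):
--     n = len(int_list)
--     if n == 0:
--         return False
--     diffs = [int_list[k + 1] - int_list[k] for k in range(n - 1)]
--     p = next((k for k, d in enumerate(diffs) if not (1 <= d <= 3)), None)
--     q = next((k for k, d in enumerate(diffs) if not (-3 <= d <= -1)), None)
--     if p is None or q is None: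
--         # already monotone-safe: dropping the first element keeps it safe
--         return True
--
--     def safe(seq):
--         ds = [seq[k + 1] - seq[k] for k in range(len(seq) - 1)]
--         return all(1 <= d <= 3 for d in ds) or all(-3 <= d <= -1 for d in ds)
--
--     # a successful removal must break the first ascending-bad pair (p, p+1)
--     # or the first descending-bad pair (q, q+1)
--     return any(safe(int_list[:j] + int_list[j + 1:])
--                for j in (p, p + 1, q, q + 1))
-- ===== Notes on version B (the rewrite author's own statement) =====
-- stated objective: faster
-- what changed: Instead of trying every removal index with a full rescan (O(n^2)), B computes the adjacent differences once, finds the first ascending-bad and first descending-bad pair, and only tries the four removal candidates that can destroy those pairs (O(n)).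
import Mathlib
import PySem

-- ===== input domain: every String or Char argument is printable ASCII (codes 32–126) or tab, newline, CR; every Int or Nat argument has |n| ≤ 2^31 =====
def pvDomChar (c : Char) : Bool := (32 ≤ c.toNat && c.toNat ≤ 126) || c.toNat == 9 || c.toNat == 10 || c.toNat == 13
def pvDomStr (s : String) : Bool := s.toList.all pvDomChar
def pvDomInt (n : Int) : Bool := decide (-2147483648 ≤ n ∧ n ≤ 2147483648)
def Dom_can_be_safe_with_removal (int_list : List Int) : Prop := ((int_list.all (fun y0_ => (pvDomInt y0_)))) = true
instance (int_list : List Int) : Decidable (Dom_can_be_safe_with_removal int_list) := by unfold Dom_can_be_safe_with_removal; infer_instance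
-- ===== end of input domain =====

-- B replaces A's try-every-removal O(n^2) scan by a single pass over the adjacent
-- differences plus at most four candidate removals (O(n)); return value only
-- (A temporarily pops/inserts on its argument but restores it before returning).

-- ===== PORT A =====
-- A's while loop over i, carrying the `ascending` flag fixed at i == 0; checks in source order.
def is_safe_go (ascending : Bool) : List Int → Bool
  | x :: y :: rest =>
    if x = y then false
    else if ¬ (0 < (x - y).natAbs ∧ (x - y).natAbs ≤ 3) then false
    else if ascending && decide (x > y) then false
    else if !ascending && decide (x < y) then false
    else is_safe_go ascending (y :: rest)
  | _ => true

def is_safe (int_list : List Int) : Bool :=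
  match int_list with
  | a :: b :: _ => is_safe_go (decide (a < b)) int_list
  | _ => true

-- `pop(i)` followed by re-`insert` restores the list; the list tested is int_list with index i removed.
def can_be_safe_with_removal (int_list : List Int) : Bool :=
  (List.range int_list.length).any (fun i => is_safe (int_list.eraseIdx i))

-- ===== PORT B =====
def diffsB : List Int → List Int
  | x :: y :: rest => (y - x) :: diffsB (y :: rest)
  | _ => []

def ascOkB (d : Int) : Bool := decide (1 ≤ d) && decide (d ≤ 3)
def descOkB (d : Int) : Bool := decide (-3 ≤ d) && decide (d ≤ -1)

def safeB (seq : List Int) : Bool :=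
  (diffsB seq).all ascOkB || (diffsB seq).all descOkB

def can_be_safe_with_removal_alt (int_list : List Int) : Bool :=
  if int_list.length = 0 then false
  else
    let ds := diffsB int_list
    match ds.findIdx? (fun d => !ascOkB d), ds.findIdx? (fun d => !descOkB d) with
    | some p, some q => [p, p + 1, q, q + 1].any (fun j => safeB (int_list.eraseIdx j))
    | _, _ => true

-- ===== PRECONDITION & SPEC =====
def Spec_can_be_safe_with_removal (int_list : List Int) (out : Bool) : Prop := out = can_be_safe_with_removal_alt int_list
instance (int_list : List Int) (out : Bool) : Decidable (Spec_can_be_safe_with_removal int_list out) := by unfold Spec_can_be_safe_with_removal; infer_instance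

-- ===== CLAIM (what is proved, stated in full; the proofs are below) =====
def Claim_equal_can_be_safe_with_removal : Prop := ∀ (int_list : List Int), Dom_can_be_safe_with_removal int_list → Spec_can_be_safe_with_removal int_list (can_be_safe_with_removal int_list)

-- ===== LEMMAS AND PROOFS =====

lemma diffsB_length : ∀ xs : List Int, (diffsB xs).length = xs.length - 1
  | [] => rfl
  | [_] => rfl
  | _ :: y :: rest => by
    simp [diffsB, diffsB_length (y :: rest)]

lemma diffsB_get : ∀ (xs : List Int) (k : Nat) (hk : k + 1 < xs.length),
    (diffsB xs)[k]'(by rw [diffsB_length]; omega) = xs[k + 1] - xs[k]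
  | x :: y :: rest, 0, _ => rfl
  | x :: y :: rest, k + 1, hk => by
    have := diffsB_get (y :: rest) k (by simpa using Nat.lt_of_succ_lt_succ hk)
    simpa [diffsB] using this

lemma mem_diffsB_adj (xs : List Int) (k : Nat) (hk : k + 1 < xs.length) :
    xs[k + 1] - xs[k] ∈ diffsB xs := by
  rw [← diffsB_get xs k hk]
  exact List.getElem_mem _

lemma diffsB_tail : ∀ xs : List Int, diffsB xs.tail = (diffsB xs).tail
  | [] => rfl
  | [_] => rfl
  | _ :: _ :: _ => rfl

lemma diffsB_subset_cons (x : Int) (s : List Int) : diffsB s ⊆ diffsB (x :: s) := by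
  cases s with
  | nil => simp [diffsB]
  | cons y t => intro d hd; simp [diffsB]; right; exact hd

-- pair (k, k+1) survives erasing index j ∉ {k, k+1}
lemma mem_diffsB_erase : ∀ (xs : List Int) (j k : Nat) (hk : k + 1 < xs.length),
    j ≠ k → j ≠ k + 1 → xs[k + 1] - xs[k] ∈ diffsB (xs.eraseIdx j)
  | x :: t, 0, k, hk, hjk, _ => by
    obtain ⟨k', rfl⟩ : ∃ k', k = k' + 1 := ⟨k - 1, by omega⟩
    have ht : k' + 1 < t.length := by simpa using hk
    simp only [List.eraseIdx_cons_zero, List.getElem_cons_succ]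
    exact mem_diffsB_adj t k' ht
  | x :: t, j + 1, 0, hk, _, hj1 => by
    have hj : j ≠ 0 := by omega
    obtain ⟨y, t', rfl⟩ : ∃ y t', t = y :: t' := by
      cases t with
      | nil => simp at hk
      | cons y t' => exact ⟨y, t', rfl⟩
    obtain ⟨j'', rfl⟩ : ∃ j'', j = j'' + 1 := ⟨j - 1, by omega⟩
    simp only [List.eraseIdx_cons_succ]
    have h1 : ((0:Nat) + 1) = 1 := rfl
    simp only [h1, List.getElem_cons_succ, List.getElem_cons_zero, diffsB,
      List.mem_cons]
    left; trivial
  | x :: t, j + 1, k + 1, hk, hjk, hj1 => by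
    have ht : k + 1 < t.length := by simpa using hk
    simp only [List.eraseIdx_cons_succ, List.getElem_cons_succ]
    exact diffsB_subset_cons x _
      (mem_diffsB_erase t j k ht (by omega) (by omega))

lemma go_true : ∀ xs : List Int, is_safe_go true xs = (diffsB xs).all ascOkB
  | [] => rfl
  | [_] => rfl
  | x :: y :: rest => by
    rw [show diffsB (x :: y :: rest) = (y - x) :: diffsB (y :: rest) from rfl,
      List.all_cons, ← go_true (y :: rest)]
    simp only [is_safe_go]
    by_cases h1 : x = y
    · subst h1; simp [ascOkB]
    · by_cases h2 : 0 < (x - y).natAbs ∧ (x - y).natAbs ≤ 3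
      · by_cases h3 : x > y
        · have hA : ascOkB (y - x) = false := by
            simp only [ascOkB]
            simp [show ¬ (1 ≤ y - x) by omega]
          simp [h1, h2, h3, hA]
        · have hA : ascOkB (y - x) = true := by
            simp only [ascOkB, Bool.and_eq_true, decide_eq_true_eq]
            omega
          simp [h1, h2, h3, hA]
      · have h2' : 3 < (x - y).natAbs := by
          rcases not_and_or.mp h2 with h | h <;> omega
        have hA : ascOkB (y - x) = false := by
          simp only [ascOkB]
          by_cases hxy : x < y
          · simp [show ¬ (y - x ≤ 3) by omega]
          · simp [show ¬ (1 ≤ y - x) by omega]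
        simp [h1, hA]
        intro _ hle _
        exfalso; omega

lemma go_false : ∀ xs : List Int, is_safe_go false xs = (diffsB xs).all descOkB
  | [] => rfl
  | [_] => rfl
  | x :: y :: rest => by
    rw [show diffsB (x :: y :: rest) = (y - x) :: diffsB (y :: rest) from rfl,
      List.all_cons, ← go_false (y :: rest)]
    simp only [is_safe_go]
    by_cases h1 : x = y
    · subst h1; simp [descOkB]
    · by_cases h2 : 0 < (x - y).natAbs ∧ (x - y).natAbs ≤ 3
      · by_cases h3 : x < y
        · have hD : descOkB (y - x) = false := by
            simp only [descOkB]
            simp [show ¬ (y - x ≤ -1) by omega]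
          simp [h1, h2, h3, hD]
        · have hD : descOkB (y - x) = true := by
            simp only [descOkB, Bool.and_eq_true, decide_eq_true_eq]
            omega
          simp [h1, h2, h3, hD]
      · have h2' : 3 < (x - y).natAbs := by
          rcases not_and_or.mp h2 with h | h <;> omega
        have hD : descOkB (y - x) = false := by
          simp only [descOkB]
          by_cases hxy : x < y
          · simp [show ¬ (y - x ≤ -1) by omega]
          · simp [show ¬ (-3 ≤ y - x) by omega]
        simp [h1, hD]
        intro _ hle _
        exfalso; omega

lemma is_safe_eq_safeB (xs : List Int) : is_safe xs = safeB xs := by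
  match xs with
  | [] => rfl
  | [_] => rfl
  | a :: b :: t =>
    by_cases hab : a < b
    · have hdesc : descOkB (b - a) = false := by
        simp [descOkB]; omega
      simp [is_safe, hab, go_true, safeB, diffsB, hdesc]
    · have hasc : ascOkB (b - a) = false := by
        simp [ascOkB]; omega
      simp [is_safe, hab, go_false, safeB, diffsB, hasc]

lemma findIdx?_some_bound {p : Int → Bool} {ds : List Int} {k : Nat}
    (h : ds.findIdx? p = some k) : k < ds.length ∧ p (ds[k]'(List.findIdx?_eq_some_iff_findIdx_eq.mp h |>.1)) = true := by
  rcases List.findIdx?_eq_some_iff_findIdx_eq.mp h with ⟨hlt, hidx⟩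
  refine ⟨hlt, ?_⟩
  subst hidx
  exact List.findIdx_getElem

lemma all_of_findIdx?_none {p : Int → Bool} {ds : List Int}
    (h : ds.findIdx? (fun d => !p d) = none) : ds.all p = true := by
  rw [List.all_eq_true]
  intro d hd
  have := List.findIdx?_eq_none_iff.mp h d hd
  simpa using this

theorem main_eq (xs : List Int) : can_be_safe_with_removal xs = can_be_safe_with_removal_alt xs := by
  unfold can_be_safe_with_removal can_be_safe_with_removal_alt
  rcases hn : xs.length with _ | n
  · rw [List.length_eq_zero_iff] at hn
    subst hn; rfl
  · have hne : xs.length ≠ 0 := by omega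
    simp only [if_neg (by omega : ¬ (n + 1 = 0))]
    -- the safety checks agree pointwise
    have hsafe : ∀ j, is_safe (xs.eraseIdx j) = safeB (xs.eraseIdx j) :=
      fun j => is_safe_eq_safeB _
    -- removal of index 0 works when one direction is never violated
    have hzero_asc : (diffsB xs).all ascOkB = true → (List.range xs.length).any (fun i => is_safe (xs.eraseIdx i)) = true := by
      intro hall
      rw [List.any_eq_true]
      refine ⟨0, by simp [hn], ?_⟩
      rw [hsafe 0, safeB]
      have : diffsB (xs.eraseIdx 0) = (diffsB xs).tail := by
        rw [show xs.eraseIdx 0 = xs.tail by cases xs <;> simp]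
        exact diffsB_tail xs
      rw [this]
      have : ((diffsB xs).tail).all ascOkB = true := by
        cases hds : diffsB xs with
        | nil => simp
        | cons d ds => rw [hds] at hall; simp_all
      simp [this]
    have hzero_desc : (diffsB xs).all descOkB = true → (List.range xs.length).any (fun i => is_safe (xs.eraseIdx i)) = true := by
      intro hall
      rw [List.any_eq_true]
      refine ⟨0, by simp [hn], ?_⟩
      rw [hsafe 0, safeB]
      have : diffsB (xs.eraseIdx 0) = (diffsB xs).tail := by
        rw [show xs.eraseIdx 0 = xs.tail by cases xs <;> simp]
        exact diffsB_tail xs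
      rw [this]
      have : ((diffsB xs).tail).all descOkB = true := by
        cases hds : diffsB xs with
        | nil => simp
        | cons d ds => rw [hds] at hall; simp_all
      simp [this]
    rcases hp : (diffsB xs).findIdx? (fun d => !ascOkB d) with _ | p
    · -- no ascending-bad pair: both sides true
      simp only []
      rw [hn] at hzero_asc
      rw [hzero_asc (all_of_findIdx?_none hp)]
    · rcases hq : (diffsB xs).findIdx? (fun d => !descOkB d) with _ | q
      · simp only []
        rw [hn] at hzero_desc
        rw [hzero_desc (all_of_findIdx?_none hq)]
      · -- both a first asc-bad pair p and a first desc-bad pair q exist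
        obtain ⟨hplt, hpbad⟩ := findIdx?_some_bound hp
        obtain ⟨hqlt, hqbad⟩ := findIdx?_some_bound hq
        rw [diffsB_length] at hplt hqlt
        have hpval : (diffsB xs)[p]'(by rw [diffsB_length]; omega) = xs[p+1]'(by omega) - xs[p]'(by omega) :=
          diffsB_get xs p (by omega)
        have hqval : (diffsB xs)[q]'(by rw [diffsB_length]; omega) = xs[q+1]'(by omega) - xs[q]'(by omega) :=
          diffsB_get xs q (by omega)
        rw [hpval] at hpbad
        rw [hqval] at hqbad
        have hpbad' : ascOkB (xs[p+1]'(by omega) - xs[p]'(by omega)) = false := by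
          simpa using hpbad
        have hqbad' : descOkB (xs[q+1]'(by omega) - xs[q]'(by omega)) = false := by
          simpa using hqbad
        rw [Bool.eq_iff_iff]
        simp only [List.any_eq_true, List.mem_range]
        constructor
        · rintro ⟨j, hj, hjs⟩
          rw [hsafe j] at hjs
          have hjs' := hjs
          rw [safeB, Bool.or_eq_true] at hjs'
          have hcand : j = p ∨ j = p + 1 ∨ j = q ∨ j = q + 1 := by
            rcases hjs' with hjs' | hjs'
            · by_contra hnot
              push Not at hnot
              have hmem := mem_diffsB_erase xs j p (by omega) (by omega) (by omega)
              have hok := (List.all_eq_true.mp hjs') _ hmem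
              simp [hok] at hpbad'
            · by_contra hnot
              push Not at hnot
              have hmem := mem_diffsB_erase xs j q (by omega) (by omega) (by omega)
              have hok := (List.all_eq_true.mp hjs') _ hmem
              simp [hok] at hqbad'
          exact ⟨j, by simp only [List.mem_cons]; tauto, hjs⟩
        · rintro ⟨j, hjmem, hjs⟩
          refine ⟨j, ?_, ?_⟩
          · simp only [List.mem_cons, List.not_mem_nil, or_false] at hjmem
            rcases hjmem with rfl | rfl | rfl | rfl <;> omega
          · rw [hsafe j]; exact hjs

-- ===== VERDICT (by name: the statement is the Claim_ definition above) =====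
theorem can_be_safe_with_removal_spec : Claim_equal_can_be_safe_with_removal := by
  intro xs _
  unfold Spec_can_be_safe_with_removal
  exact main_eq xs
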